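-- pv_equiv track=rewrite | github.com/ssfdust/cmtprinter | cmtprinter/core.py | _redraw_the_header_line
-- ===== SOURCE A (Python) =====
-- def _redraw_the_header_line(table_text: str, tablechar: str) -> str:
--     linecnt = 0
--     new_table_text_list = []
--     for line in table_text.splitlines():
--         if line:
--             linecnt += 1
--             if linecnt == 1:
--                 line = tablechar * len(line)
--             new_table_text_list.append(line)
--     return "\n".join(new_table_text_list)
-- ===== SOURCE B (Python) =====
-- def _redraw_the_header_line(table_text: str, tablechar: str) -> str:
--     tail = []
--     head = None
--     for line in reversed(table_text.splitlines()):
--         if line: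
--             if head is not None:
--                 tail.append(head)
--             head = line
--     if head is None:
--         return ""
--     tail.append(tablechar * len(head))
--     tail.reverse()
--     return "\n".join(tail)
-- ===== Notes on version B (the rewrite author's own statement) =====
-- stated objective: alternative
-- what changed: B traverses the lines in reverse, carrying the current earliest non-empty line as the header candidate and pushing the lines it displaces onto a back-to-front tail list that is reversed once at the end, instead of A's forward loop with a counter and an in-loop first-line branch.
import Mathlib
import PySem

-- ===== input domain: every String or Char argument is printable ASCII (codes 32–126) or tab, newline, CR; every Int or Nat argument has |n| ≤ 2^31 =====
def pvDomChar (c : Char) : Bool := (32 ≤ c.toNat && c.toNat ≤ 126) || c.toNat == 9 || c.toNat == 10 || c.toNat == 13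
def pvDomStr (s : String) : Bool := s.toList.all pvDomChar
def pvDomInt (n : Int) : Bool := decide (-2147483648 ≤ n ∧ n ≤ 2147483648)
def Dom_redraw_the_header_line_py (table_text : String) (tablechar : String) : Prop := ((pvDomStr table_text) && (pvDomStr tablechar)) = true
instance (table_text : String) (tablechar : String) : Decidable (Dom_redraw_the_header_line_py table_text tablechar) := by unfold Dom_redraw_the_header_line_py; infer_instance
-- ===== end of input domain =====

-- B traverses the lines in reverse, collecting the tail back-to-front and tracking the header candidate (objective: alternative).



-- tablechar * len(line)  (appears verbatim in both Pythons)
def pvRep (tablechar line : String) : String :=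
  String.ofList (PySem.List.pyRepeat tablechar.toList (PySem.Str.len line))

-- ===== PORT A =====
def pvStep (tablechar : String) (st : Int × List String) (line : String) : Int × List String :=
  if line ≠ "" then
    let linecnt := st.1 + 1
    let line := if linecnt = 1 then pvRep tablechar line else line
    (linecnt, st.2 ++ [line])
  else st

def redraw_the_header_line_py (table_text : String) (tablechar : String) : String :=
  let st := (PySem.Str.splitlines table_text).foldl (pvStep tablechar) (0, [])
  PySem.Str.join "\n" st.2

-- ===== PORT B =====
-- reverse loop body: if line: (if head is not None: tail.append(head)); head = line
def pvStepB (st : Option String × List String) (line : String) : Option String × List String :=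
  if line ≠ "" then
    (some line,
     match st.1 with
     | some h => st.2 ++ [h]
     | none => st.2)
  else st

def redraw_the_header_line_py_alt (table_text : String) (tablechar : String) : String :=
  let st := (PySem.Str.splitlines table_text).reverse.foldl pvStepB (none, [])
  match st.1 with
  | none => ""
  | some head => PySem.Str.join "\n" ((st.2 ++ [pvRep tablechar head]).reverse)

-- ===== PRECONDITION & SPEC =====
def Spec_redraw_the_header_line_py (table_text : String) (tablechar : String) (out : String) : Prop := out = redraw_the_header_line_py_alt table_text tablechar
instance (table_text : String) (tablechar : String) (out : String) : Decidable (Spec_redraw_the_header_line_py table_text tablechar out) := by unfold Spec_redraw_the_header_line_py; infer_instance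

-- ===== CLAIM =====
def Claim_equal_redraw_the_header_line_py : Prop := ∀ (table_text : String) (tablechar : String), Dom_redraw_the_header_line_py table_text tablechar → Spec_redraw_the_header_line_py table_text tablechar (redraw_the_header_line_py table_text tablechar)

-- ===== LEMMAS AND PROOFS =====

-- A side: once a nonempty line has been seen (cnt ≥ 1), the loop just appends the nonempty lines
lemma pvStep_tail (tablechar : String) (ls : List String) :
    ∀ (cnt : Int) (acc : List String), 1 ≤ cnt →
      (ls.foldl (pvStep tablechar) (cnt, acc)).2 = acc ++ ls.filter (fun l => l ≠ "") := by
  induction ls with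
  | nil => intro cnt acc _; simp
  | cons h t ih =>
    intro cnt acc hcnt
    by_cases hh : h = ""
    · simp [pvStep, hh, ih cnt acc hcnt]
    · have : ¬ cnt + 1 = 1 := by omega
      simp [pvStep, hh, this, ih (cnt + 1) (acc ++ [h]) (by omega)]

lemma pvFold_eq (tablechar : String) (ls : List String) :
    (ls.foldl (pvStep tablechar) (0, [])).2 =
      (match ls.filter (fun l => l ≠ "") with
       | [] => []
       | h :: rest => pvRep tablechar h :: rest) := by
  induction ls with
  | nil => simp
  | cons h t ih =>
    by_cases hh : h = ""
    · simpa [pvStep, hh] using ih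
    · simp [pvStep, hh, pvStep_tail tablechar t 1 [pvRep tablechar h] le_rfl]

-- B side: the reverse fold yields the first nonempty line and the reversed tail
lemma pvFoldB_eq (ls : List String) :
    ls.reverse.foldl pvStepB (none, []) =
      (match ls.filter (fun l => l ≠ "") with
       | [] => ((none : Option String), ([] : List String))
       | h :: rs => (some h, rs.reverse)) := by
  induction ls with
  | nil => rfl
  | cons x t ih =>
    rw [List.reverse_cons, List.foldl_append, ih]
    by_cases hx : x = ""
    · rw [List.filter_cons_of_neg (by simp [hx])]
      simp [List.foldl, pvStepB, hx]
    · rw [List.filter_cons_of_pos (by simp [hx])]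
      cases hft : t.filter (fun l => l ≠ "") with
      | nil => simp [List.foldl, pvStepB, hx]
      | cons h rs => simp [List.foldl, pvStepB, hx]

-- ===== VERDICT =====
theorem redraw_the_header_line_py_spec : Claim_equal_redraw_the_header_line_py := by
  intro table_text tablechar _
  show _ = _
  unfold redraw_the_header_line_py redraw_the_header_line_py_alt
  rw [pvFoldB_eq]
  simp only [pvFold_eq]
  cases hft : (PySem.Str.splitlines table_text).filter (fun l => l ≠ "") with
  | nil => rfl
  | cons h rs => simp
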